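-- pv_equiv track=rewrite | github.com/denis-svg/Laborator | md1/3.py | parser_pattern
-- ===== SOURCE A (Python) =====
-- def parser_pattern(pattern):
--     pattern += "0"
--     out = []
--     i = 0
--     while i < len(pattern) - 1:
--         if pattern[i + 1] == "*":
--             out.append(pattern[i] + pattern[i + 1])
--             i += 2
--             continue
--         else:
--             out.append(pattern[i])
--             i += 1
--     return out
-- ===== SOURCE B (Python) =====
-- import re
--
-- def parser_pattern(pattern):
--     return re.findall(r'.\*?', pattern, re.DOTALL)
-- ===== Notes on version B (the rewrite author's own statement) =====
-- stated objective: idiomatic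
-- what changed: Replaced the explicit indexed while-loop with a sentinel append by a single regex findall that tokenizes the pattern into single characters or character-plus-star pairs in one library call.
import Mathlib
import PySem

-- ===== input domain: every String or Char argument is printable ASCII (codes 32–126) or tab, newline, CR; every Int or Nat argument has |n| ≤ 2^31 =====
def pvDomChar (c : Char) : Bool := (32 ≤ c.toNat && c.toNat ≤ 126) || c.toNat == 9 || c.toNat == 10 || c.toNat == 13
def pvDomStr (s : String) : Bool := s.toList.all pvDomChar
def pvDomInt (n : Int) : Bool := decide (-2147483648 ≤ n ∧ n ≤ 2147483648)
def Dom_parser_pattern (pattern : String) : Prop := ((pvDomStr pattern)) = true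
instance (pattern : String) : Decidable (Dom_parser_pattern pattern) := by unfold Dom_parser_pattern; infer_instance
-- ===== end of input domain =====

-- B replaces A's indexed while-loop with sentinel by a regex findall r'.\*?' (ported as a
-- direct structural recursion realizing that regex's semantics); objective: idiomatic.

-- ===== PORT A =====
-- A: pattern += "0"; indexed while-loop over i < len-1, pairing pattern[i] with a following '*'.
-- Index accesses are always in range here, so List.getD is exact for Python's pattern[i].
def pvLoopA (cs : List Char) (i : Nat) : List String :=
  if _h : i < cs.length - 1 then
    if cs.getD (i+1) ' ' = '*' then
      String.ofList [cs.getD i ' ', cs.getD (i+1) ' '] :: pvLoopA cs (i+2)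
    else
      String.ofList [cs.getD i ' '] :: pvLoopA cs (i+1)
  else []
termination_by cs.length - i

def parser_pattern (pattern : String) : List String :=
  pvLoopA (pattern.toList ++ ['0']) 0

-- ===== PORT B =====
-- B: re.findall(r'.\*?', pattern, re.DOTALL) — each char greedily takes an immediately
-- following '*'; transcribed as structural recursion on the character list.
def pvTokB : List Char → List String
  | [] => []
  | [c] => [String.ofList [c]]
  | c :: d :: rest =>
    if d = '*' then String.ofList [c, d] :: pvTokB rest
    else String.ofList [c] :: pvTokB (d :: rest)

def parser_pattern_alt (pattern : String) : List String :=
  pvTokB pattern.toList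

-- ===== PRECONDITION & SPEC =====
def Spec_parser_pattern (pattern : String) (out : List String) : Prop := out = parser_pattern_alt pattern
instance (pattern : String) (out : List String) : Decidable (Spec_parser_pattern pattern out) := by unfold Spec_parser_pattern; infer_instance

-- ===== CLAIM (what is proved, stated in full; the proofs are below) =====
def Claim_equal_parser_pattern : Prop := ∀ (pattern : String), Dom_parser_pattern pattern → Spec_parser_pattern pattern (parser_pattern pattern)

-- ===== LEMMAS AND PROOFS =====

lemma pvLoopA_eq (n : Nat) : ∀ (cs : List Char) (i : Nat), cs.length - i ≤ n →
    pvLoopA (cs ++ ['0']) i = pvTokB (cs.drop i) := by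
  induction n with
  | zero =>
    intro cs i h
    have hlen : cs.length ≤ i := by omega
    rw [pvLoopA]
    simp [List.drop_eq_nil_of_le hlen, pvTokB]
    omega
  | succ n ih =>
    intro cs i h
    by_cases hi : i < cs.length
    · have hcond : i < (cs ++ ['0']).length - 1 := by simp; omega
      rw [pvLoopA, dif_pos hcond]
      have hdrop : cs.drop i = cs[i] :: cs.drop (i+1) := List.drop_eq_getElem_cons hi
      have hgi : (cs ++ ['0']).getD i ' ' = cs[i] := by
        rw [List.getD_eq_getElem?_getD, List.getElem?_append_left hi,
          List.getElem?_eq_getElem hi]; rfl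
      by_cases hi1 : i + 1 < cs.length
      · have hgi1 : (cs ++ ['0']).getD (i+1) ' ' = cs[i+1] := by
          rw [List.getD_eq_getElem?_getD, List.getElem?_append_left hi1,
            List.getElem?_eq_getElem hi1]; rfl
        have hdrop1 : cs.drop (i+1) = cs[i+1] :: cs.drop (i+2) := List.drop_eq_getElem_cons hi1
        rw [hgi, hgi1, hdrop, hdrop1]
        by_cases hstar : cs[i+1] = '*'
        · rw [if_pos hstar, pvTokB, if_pos hstar, ih cs (i+2) (by omega)]
        · rw [if_neg hstar, pvTokB, if_neg hstar, ih cs (i+1) (by omega), hdrop1]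
      · -- i+1 = cs.length: next char is the sentinel '0', never '*'
        have hieq : i + 1 = cs.length := by omega
        have hg0 : (cs ++ ['0']).getD (i+1) ' ' = '0' := by
          rw [List.getD_eq_getElem?_getD, List.getElem?_append_right (by omega)]
          simp [hieq]
        rw [hgi, hg0, if_neg (by decide), hdrop]
        have hnil : cs.drop (i+1) = [] := List.drop_eq_nil_of_le (by omega)
        rw [hnil, pvTokB, ih cs (i+1) (by omega), hnil, pvTokB]
    · have hcond : ¬ i < (cs ++ ['0']).length - 1 := by simp; omega
      rw [pvLoopA, dif_neg hcond, List.drop_eq_nil_of_le (by omega), pvTokB]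

-- ===== VERDICT (by name: the statement is the Claim_ definition above) =====
theorem parser_pattern_spec : Claim_equal_parser_pattern := by
  intro pattern _
  unfold Spec_parser_pattern parser_pattern parser_pattern_alt
  simpa using pvLoopA_eq pattern.toList.length pattern.toList 0 (by omega)
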